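-- pv_equiv track=rewrite | github.com/nikhilro/daily-coding-problem | p70.py | find_perfect_naive
-- ===== SOURCE A (Python) =====
-- def find_perfect_naive(nth):
--     cur, num = 0, 10
--     while True:
--         if 10 == sum(int(dig) for dig in str(num)):
--             cur += 1
--             if cur == nth:
--                 return num
--         num += 1
-- ===== SOURCE B (Python) =====
-- def find_perfect_naive(nth):
--     # Generate only the numbers whose digits sum to 10, in increasing order,
--     # length by length, instead of scanning every integer.
--     def gen(d, s):
--         # all digit lists of length d (digits 0-9) summing to s, ascending (lex) order
--         if d == 0:
--             return [[]] if s == 0 else []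
--         out = []
--         for a in range(10):
--             if a <= s:
--                 for rest in gen(d - 1, s - a):
--                     out.append([a] + rest)
--         return out
--
--     sols = []
--     d = 2
--     while len(sols) < nth:
--         for first in range(1, 10):
--             for rest in gen(d - 1, 10 - first):
--                 num = first
--                 for dig in rest:
--                     num = num * 10 + dig
--                 sols.append(num)
--         d += 1
--     return sols[nth - 1]
-- ===== Notes on version B (the rewrite author's own statement) =====
-- stated objective: faster
-- what changed: A scans every integer upward, computing each one's digit sum via str(); B generates, length by length, exactly the digit lists with the target digit sum in lexicographic order and assembles the numbers directly, so only solutions are ever produced.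
-- outside the precondition, e.g. on find_perfect_naive(0): A does not finish within the time limit, B raises IndexError
import Mathlib
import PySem

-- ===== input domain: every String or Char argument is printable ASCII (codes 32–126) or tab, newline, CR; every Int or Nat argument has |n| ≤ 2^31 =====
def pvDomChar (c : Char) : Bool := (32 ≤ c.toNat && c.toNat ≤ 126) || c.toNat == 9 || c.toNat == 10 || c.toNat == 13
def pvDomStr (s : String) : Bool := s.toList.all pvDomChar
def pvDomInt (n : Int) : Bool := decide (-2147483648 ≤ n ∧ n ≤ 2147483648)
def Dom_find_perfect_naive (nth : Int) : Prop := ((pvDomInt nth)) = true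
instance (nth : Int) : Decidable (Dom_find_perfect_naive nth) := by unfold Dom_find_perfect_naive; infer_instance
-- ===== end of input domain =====

-- B replaces A's scan of every integer (testing each digit sum via str()) by direct
-- lexicographic generation, length by length, of exactly the numbers with the target
-- digit sum; objective: faster (work proportional to the solutions generated, not to
-- the value of the answer).

-- ===== PORT A =====
-- sum(int(dig) for dig in str(num)); str(num) iterated via toChars ((toStr num).toList);
-- int(dig) is PySem.Int.ofChars? on the one-character string — on a decimal digit it is
-- always `some`, the `getD 0` is only a totality guard.
def pvDigitSumA (num : Int) : Int :=
  ((PySem.Int.toChars num).map (fun c => (PySem.Int.ofChars? [c]).getD 0)).sum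

-- Lemmas the port of A needs for termination (A's while-loop terminates because numbers
-- with digit sum 10 exist above every bound, e.g. 19·10^m).
lemma pv_toDigitsCore_eq : ∀ (fuel n : Nat) (acc : List Char), n < fuel → 0 < n →
    Nat.toDigitsCore 10 fuel n acc = ((Nat.digits 10 n).reverse.map Nat.digitChar) ++ acc := by
  intro fuel
  induction fuel with
  | zero => omega
  | succ f ih =>
    intro n acc hlt hn
    rw [Nat.digits_def' (by norm_num : (1:Nat) < 10) hn]
    simp only [Nat.toDigitsCore]
    by_cases h10 : n / 10 = 0
    · rw [if_pos h10, h10]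
      simp
    · rw [if_neg h10, ih (n / 10) _ (by
        have := Nat.div_lt_self hn (by norm_num : (1:Nat) < 10); omega)
        (Nat.pos_of_ne_zero h10)]
      simp

lemma pv_digitChar_parse (d : Nat) (h : d < 10) :
    ((PySem.Int.ofChars? [Nat.digitChar d]).getD 0) = (d : Int) := by
  interval_cases d <;> decide

lemma pv_digitSumA_eq (n : Nat) : pvDigitSumA (n : Int) = ((Nat.digits 10 n).sum : Int) := by
  unfold pvDigitSumA
  simp only [PySem.Int.toChars, if_neg (by omega : ¬ (n : Int) < 0), Int.toNat_natCast]
  rcases Nat.eq_zero_or_pos n with h0 | hpos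
  · subst h0; decide
  · rw [show Nat.toDigits 10 n = Nat.toDigitsCore 10 (n + 1) n [] from rfl,
      pv_toDigitsCore_eq (n + 1) n [] (by omega) hpos, List.append_nil, List.map_map]
    rw [show ((fun c => (PySem.Int.ofChars? [c]).getD 0) ∘ Nat.digitChar) =
        (fun d => (PySem.Int.ofChars? [Nat.digitChar d]).getD 0) from rfl]
    rw [List.map_congr_left (fun d hd => pv_digitChar_parse d
      (Nat.digits_lt_base (by norm_num) (List.mem_reverse.mp hd)))]
    rw [List.map_reverse, List.sum_reverse]
    exact (Nat.cast_list_sum _).symm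

lemma pv_sum_digits_mul_pow (m : Nat) (hm : 0 < m) :
    ∀ j, (Nat.digits 10 (m * 10 ^ j)).sum = (Nat.digits 10 m).sum := by
  intro j
  induction j with
  | zero => simp
  | succ j ih =>
    have hpos : 0 < m * 10 ^ (j + 1) := by positivity
    rw [Nat.digits_def' (by norm_num : (1:Nat) < 10) hpos]
    have h1 : m * 10 ^ (j + 1) % 10 = 0 := by
      rw [pow_succ, ← Nat.mul_assoc]; exact Nat.mul_mod_left _ _
    have h2 : m * 10 ^ (j + 1) / 10 = m * 10 ^ j := by
      rw [pow_succ, ← Nat.mul_assoc]; exact Nat.mul_div_cancel _ (by norm_num)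
    rw [h1, h2, List.sum_cons, ih, Nat.zero_add]

lemma pv_exists_sol (m : Nat) : ∃ k, m ≤ k ∧ pvDigitSumA (k : Int) = 10 := by
  refine ⟨19 * 10 ^ m, ?_, ?_⟩
  · have := Nat.lt_pow_self (n := m) (a := 10) (by norm_num)
    nlinarith
  · rw [pv_digitSumA_eq, pv_sum_digits_mul_pow 19 (by norm_num) m]
    norm_num

def pvNext (m : Nat) : Nat := Nat.find (pv_exists_sol m)

lemma pvGap_lt (m : Nat) (h : pvDigitSumA (m : Int) ≠ 10) :
    pvNext (m + 1) - (m + 1) < pvNext m - m := by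
  obtain ⟨hle, hsum⟩ := Nat.find_spec (pv_exists_sol m)
  have hne : pvNext m ≠ m := fun he => h (by rw [← he]; exact hsum)
  have h1 : m + 1 ≤ pvNext m := by
    have : m ≤ pvNext m := hle
    omega
  have heq : pvNext (m + 1) = pvNext m := by
    apply le_antisymm
    · exact Nat.find_min' (pv_exists_sol (m + 1)) ⟨h1, hsum⟩
    · obtain ⟨hle', hsum'⟩ := Nat.find_spec (pv_exists_sol (m + 1))
      exact Nat.find_min' (pv_exists_sol m) ⟨Nat.le_of_succ_le hle', hsum'⟩
  omega

-- the loop `cur, num = 0, 10; while True: …`; the leading `nth ≤ cur` test is only a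
-- totality guard: Python's loop never returns when nth ≤ 0, and for 1 ≤ nth the guard
-- is never reached (cur < nth is invariant).
def pvLoopA (nth : Int) (cur num : Nat) : Int :=
  if h : nth ≤ (cur : Int) then 0
  else if (10 : Int) = pvDigitSumA (num : Int) then
    if ((cur : Int) + 1) = nth then (num : Int)
    else pvLoopA nth (cur + 1) (num + 1)
  else pvLoopA nth cur (num + 1)
termination_by ((nth - (cur : Int)).toNat, pvNext num - num)
decreasing_by
  · apply Prod.Lex.left; omega
  · apply Prod.Lex.right; exact pvGap_lt num (fun he => ‹¬10 = pvDigitSumA ↑num› he.symm)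

def find_perfect_naive (nth : Int) : Int := pvLoopA nth 0 10

-- ===== PORT B =====
-- gen(d, s): all digit lists of length d summing to s, in ascending (lex) order
def pvGen : Nat → Nat → List (List Nat)
  | 0, s => if s = 0 then [[]] else []
  | d + 1, s =>
      (List.range 10).flatMap (fun a =>
        if a ≤ s then (pvGen d (s - a)).map (fun rest => a :: rest) else [])

-- num = first; for dig in rest: num = num*10 + dig
def pvNum (first : Nat) (rest : List Nat) : Nat :=
  rest.foldl (fun num dig => num * 10 + dig) first

-- one round of the while-loop body: all d-digit solutions, ascending
def pvBatch (d : Nat) : List Nat :=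
  (List.range' 1 9).flatMap (fun first =>
    (pvGen (d - 1) (10 - first)).map (fun rest => pvNum first rest))

-- Lemma the port of B needs for termination: every round appends at least one solution.
lemma pvGen_mem_exists : ∀ d s, s ≤ 9 → ∃ l, l ∈ pvGen (d + 1) s := by
  intro d
  induction d with
  | zero =>
    intro s hs
    refine ⟨[s], ?_⟩
    simp only [pvGen, List.mem_flatMap]
    exact ⟨s, by simp [List.mem_range]; omega, by simp⟩
  | succ d ih =>
    intro s hs
    obtain ⟨l, hl⟩ := ih s hs
    refine ⟨0 :: l, ?_⟩
    rw [pvGen]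
    refine List.mem_flatMap.mpr ⟨0, by simp, ?_⟩
    rw [if_pos (Nat.zero_le s), Nat.sub_zero]
    exact List.mem_map_of_mem hl

lemma pvBatch_nonempty (k : Nat) : pvBatch (k + 2) ≠ [] := by
  obtain ⟨l, hl⟩ := pvGen_mem_exists k 9 (le_refl 9)
  apply List.ne_nil_of_mem (a := pvNum 1 l)
  simp only [pvBatch, List.mem_flatMap]
  refine ⟨1, by simp [List.mem_range'_1], ?_⟩
  have h1 : k + 2 - 1 = k + 1 := by omega
  have h2 : 10 - 1 = 9 := by omega
  rw [h1, h2]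
  exact List.mem_map_of_mem hl

-- while len(sols) < nth: …; d += 1   (d = k + 2, starting at 2)
def pvLoopB (nth : Int) (sols : List Nat) (k : Nat) : List Nat :=
  if (sols.length : Int) < nth then pvLoopB nth (sols ++ pvBatch (k + 2)) (k + 1) else sols
termination_by (nth - (sols.length : Int)).toNat
decreasing_by
  have := List.length_pos_of_ne_nil (pvBatch_nonempty k)
  simp only [List.length_append]
  omega

-- sols[nth - 1]; with nth ≤ 0 (outside Pre_) Python raises IndexError, pyGetD's
-- default 0 is only a totality guard there.
def find_perfect_naive_alt (nth : Int) : Int :=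
  ((PySem.List.pyGetD (pvLoopB nth [] 0) (nth - 1) 0 : Nat) : Int)

-- ===== PRECONDITION & SPEC =====
-- Pre_ excludes nth ≤ 0, on which A loops forever (never returns) and B raises IndexError.
def Pre_find_perfect_naive (nth : Int) : Prop := 1 ≤ nth
instance (nth : Int) : Decidable (Pre_find_perfect_naive nth) := by
  unfold Pre_find_perfect_naive; infer_instance
def pvWitness_find_perfect_naive : Int := 1

def Spec_find_perfect_naive (nth : Int) (out : Int) : Prop := out = find_perfect_naive_alt nth
instance (nth : Int) (out : Int) : Decidable (Spec_find_perfect_naive nth out) := by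
  unfold Spec_find_perfect_naive; infer_instance

-- ===== CLAIM (what is proved, stated in full; the proofs are below) =====
def Claim_equal_find_perfect_naive : Prop := ∀ (nth : Int), Dom_find_perfect_naive nth → Pre_find_perfect_naive nth → Spec_find_perfect_naive nth (find_perfect_naive nth)

-- ===== LEMMAS AND PROOFS =====

-- the common mathematical predicate: decimal digit sum is 10
def pvP (n : Nat) : Bool := (Nat.digits 10 n).sum == 10

-- all digit lists of length d, in lexicographic order
def pvAll : Nat → List (List Nat)
  | 0 => [[]]
  | d + 1 => (List.range 10).flatMap (fun a => (pvAll d).map (fun l => a :: l))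

lemma mem_pvAll {d : Nat} {l : List Nat} (h : l ∈ pvAll d) :
    l.length = d ∧ ∀ x ∈ l, x < 10 := by
  induction d generalizing l with
  | zero => simp only [pvAll, List.mem_singleton] at h; subst h; simp
  | succ d ih =>
    simp only [pvAll, List.mem_flatMap, List.mem_map] at h
    obtain ⟨a, ha, l', hl', rfl⟩ := h
    obtain ⟨hlen, hbound⟩ := ih hl'
    refine ⟨by simp [hlen], ?_⟩
    intro x hx
    rcases List.mem_cons.mp hx with rfl | hx
    · exact List.mem_range.mp ha
    · exact hbound x hx

lemma pvGen_eq : ∀ (d s : Nat), pvGen d s = (pvAll d).filter (fun l => l.sum == s) := by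
  intro d
  induction d with
  | zero =>
    intro s
    rw [pvGen, pvAll]
    rcases Nat.eq_zero_or_pos s with rfl | hs
    · simp
    · rw [if_neg (by omega)]
      simp only [List.filter, List.sum_nil]
      rw [show ((0 == s) : Bool) = false by simp; omega]
  | succ d ih =>
    intro s
    rw [pvGen, pvAll, List.filter_flatMap]
    refine congrArg (List.flatMap · (List.range 10)) (funext fun a => ?_)
    rw [List.filter_map, ih]
    by_cases ha : a ≤ s
    · rw [if_pos ha]
      apply congrArg
      apply List.filter_congr
      intro l _
      show (l.sum == s - a) = ((a :: l).sum == s)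
      rw [List.sum_cons, Bool.eq_iff_iff, beq_iff_eq, beq_iff_eq]
      omega
    · rw [if_neg ha]
      symm
      rw [List.map_eq_nil_iff, List.filter_eq_nil_iff]
      intro l _
      show ¬((a :: l).sum == s) = true
      simp only [List.sum_cons, beq_iff_eq]
      omega

lemma pvNum_eq_ofDigits (l : List Nat) (c : Nat) :
    pvNum c l = Nat.ofDigits 10 l.reverse + 10 ^ l.length * c := by
  induction l generalizing c with
  | nil => simp [pvNum]
  | cons x l ih =>
    have step : pvNum c (x :: l) = pvNum (c * 10 + x) l := by simp [pvNum]
    rw [step, ih]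
    rw [List.reverse_cons, Nat.ofDigits_append, Nat.ofDigits_singleton,
      List.length_reverse, List.length_cons]
    ring

lemma pv_digits_pvNum {a : Nat} (ha0 : 1 ≤ a) (ha9 : a < 10) {l : List Nat}
    (hl : ∀ x ∈ l, x < 10) : Nat.digits 10 (pvNum a l) = l.reverse ++ [a] := by
  have hval : pvNum a l = Nat.ofDigits 10 (l.reverse ++ [a]) := by
    rw [pvNum_eq_ofDigits, Nat.ofDigits_append, Nat.ofDigits_singleton,
      List.length_reverse]
  rw [hval]
  apply Nat.digits_ofDigits 10 (by norm_num)
  · intro x hx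
    rcases List.mem_append.mp hx with hx | hx
    · exact hl x (List.mem_reverse.mp hx)
    · simp only [List.mem_singleton] at hx; omega
  · intro _
    rw [List.getLast_concat]
    omega

lemma pv_range'_flatMap : ∀ (t s m : Nat),
    (List.range' s t).flatMap (fun a => (List.range m).map (fun x => a * m + x)) =
      List.range' (s * m) (t * m) := by
  intro t
  induction t with
  | zero => simp
  | succ t ih =>
    intro s m
    rw [List.range'_succ, List.flatMap_cons, ih (s + 1) m]
    rw [show (List.range m).map (fun x => s * m + x) = List.range' (s * m) m from
      (List.range'_eq_map_range).symm]
    rw [show (s + 1) * m = s * m + 1 * m by ring]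
    rw [List.range'_append]
    rw [show m + t * m = (t + 1) * m by ring]

lemma pv_map_pvNum_pvAll : ∀ (d : Nat), (pvAll d).map (pvNum 0) = List.range (10 ^ d) := by
  intro d
  induction d with
  | zero => simp [pvAll, pvNum, List.range_one]
  | succ d ih =>
    rw [pvAll, List.map_flatMap]
    have hcomp : ∀ a : Nat,
        ((pvAll d).map (fun l => a :: l)).map (pvNum 0) =
          (List.range (10 ^ d)).map (fun x => a * 10 ^ d + x) := by
      intro a
      rw [List.map_map]
      have h1 : ∀ l ∈ pvAll d, (pvNum 0 ∘ (fun l => a :: l)) l = a * 10 ^ d + pvNum 0 l := by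
        intro l hl
        have hlen := (mem_pvAll hl).1
        show pvNum 0 (a :: l) = a * 10 ^ d + pvNum 0 l
        have : pvNum 0 (a :: l) = pvNum a l := by simp [pvNum]
        rw [this, pvNum_eq_ofDigits, pvNum_eq_ofDigits, hlen]
        ring
      rw [List.map_congr_left h1, ← ih, List.map_map]
      rfl
    calc (List.range 10).flatMap (fun a => ((pvAll d).map (fun l => a :: l)).map (pvNum 0))
        = (List.range' 0 10).flatMap (fun a => (List.range (10 ^ d)).map (fun x => a * 10 ^ d + x)) := by
          rw [← List.range_eq_range']
          exact congrArg (List.flatMap · (List.range 10)) (funext hcomp)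
      _ = List.range' (0 * 10 ^ d) (10 * 10 ^ d) := pv_range'_flatMap 10 0 (10 ^ d)
      _ = List.range (10 ^ (d + 1)) := by
          rw [Nat.zero_mul, ← List.range_eq_range']
          congr 1
          ring


lemma pvBatch_eq (d : Nat) :
    pvBatch (d + 1) = (List.range' (10 ^ d) (9 * 10 ^ d)).filter pvP := by
  have comp : ∀ a, 1 ≤ a → a < 10 →
      (pvGen d (10 - a)).map (pvNum a) =
        List.filter pvP ((List.range (10 ^ d)).map (fun x => a * 10 ^ d + x)) := by
    intro a ha1 ha9
    rw [← pv_map_pvNum_pvAll d, List.map_map]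
    have h1 : ∀ l ∈ pvAll d, ((fun x => a * 10 ^ d + x) ∘ pvNum 0) l = pvNum a l := by
      intro l hl
      have hlen := (mem_pvAll hl).1
      show a * 10 ^ d + pvNum 0 l = pvNum a l
      rw [pvNum_eq_ofDigits, pvNum_eq_ofDigits, hlen]
      ring
    rw [List.map_congr_left h1, List.filter_map]
    rw [pvGen_eq]
    apply congrArg
    apply List.filter_congr
    intro l hl
    show (l.sum == 10 - a) = (pvP ∘ pvNum a) l
    have hmem := (mem_pvAll hl).2
    show (l.sum == 10 - a) = pvP (pvNum a l)
    unfold pvP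
    rw [pv_digits_pvNum ha1 ha9 hmem, List.sum_append, List.sum_reverse]
    rw [Bool.eq_iff_iff, beq_iff_eq, beq_iff_eq]
    simp only [List.sum_cons, List.sum_nil]
    omega
  have hflat : pvBatch (d + 1) =
      (List.range' 1 9).flatMap
        (fun a => List.filter pvP ((List.range (10 ^ d)).map (fun x => a * 10 ^ d + x))) := by
    unfold pvBatch
    simp only [Nat.add_sub_cancel]
    exact List.flatMap_congr fun a hmem => by
      obtain ⟨h1, h2⟩ := List.mem_range'_1.mp hmem
      exact comp a h1 (by omega)
  rw [hflat, ← List.filter_flatMap, pv_range'_flatMap 9 1 (10 ^ d), one_mul]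

lemma pv_loopA_eq : ∀ (K : Nat) (cur num : Nat) (nth : Int), (cur : Int) < nth →
    (nth - cur).toNat ≤ (((List.range' num K).filter pvP).length) →
    pvLoopA nth cur num =
      ((((List.range' num K).filter pvP).getD ((nth - cur).toNat - 1) 0 : Nat) : Int) := by
  intro K
  induction K with
  | zero =>
    intro cur num nth h1 h2
    simp only [List.range'_zero, List.filter_nil, List.length_nil] at h2
    omega
  | succ K ih =>
    intro cur num nth h1 h2
    rw [List.range'_succ] at h2 ⊢
    rw [pvLoopA, dif_neg (by omega : ¬ nth ≤ (cur : Int))]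
    by_cases hp : pvP num = true
    · have hc : (10 : Int) = pvDigitSumA (num : Int) := by
        rw [pv_digitSumA_eq]
        unfold pvP at hp
        rw [beq_iff_eq] at hp
        exact_mod_cast hp.symm
      rw [if_pos hc]
      rw [List.filter_cons_of_pos hp] at h2 ⊢
      by_cases he : ((cur : Int) + 1) = nth
      · rw [if_pos he]
        have ht : (nth - cur).toNat = 1 := by omega
        rw [ht]
        simp
      · rw [if_neg he]
        simp only [List.length_cons] at h2
        rw [ih (cur + 1) (num + 1) nth (by omega) (by push_cast; omega)]
        have hidx : (nth - (cur : Int)).toNat - 1 =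
            ((nth - ((cur + 1 : Nat) : Int)).toNat - 1) + 1 := by push_cast; omega
        rw [hidx, List.getD_cons_succ]
    · have hc : ¬ ((10 : Int) = pvDigitSumA (num : Int)) := by
        rw [pv_digitSumA_eq]
        unfold pvP at hp
        rw [beq_iff_eq] at hp
        intro hcontra
        exact hp (by exact_mod_cast hcontra.symm)
      rw [if_neg hc]
      rw [List.filter_cons_of_neg (by simpa using hp)] at h2 ⊢
      exact ih cur (num + 1) nth h1 h2

lemma pv_loopB_eq (nth : Int) : ∀ (n k : Nat) (sols : List Nat),
    (nth - (sols.length : Int)).toNat = n →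
    sols = (List.range' 10 (10 ^ (k + 1) - 10)).filter pvP →
    ∃ K, pvLoopB nth sols k = (List.range' 10 (10 ^ (K + 1) - 10)).filter pvP ∧
      nth ≤ (((List.range' 10 (10 ^ (K + 1) - 10)).filter pvP).length : Int) := by
  intro n
  induction n using Nat.strong_induction_on with
  | _ n ih =>
    intro k sols hn hs
    rw [pvLoopB]
    by_cases hlt : (sols.length : Int) < nth
    · rw [if_pos hlt]
      have hp10 : 10 ≤ 10 ^ (k + 1) := by
        calc (10:Nat) = 10 ^ 1 := (pow_one 10).symm
        _ ≤ 10 ^ (k + 1) := Nat.pow_le_pow_right (by norm_num) (by omega)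
      have hnew : sols ++ pvBatch (k + 2) =
          (List.range' 10 (10 ^ (k + 2) - 10)).filter pvP := by
        rw [hs, show k + 2 = (k + 1) + 1 from rfl, pvBatch_eq (k + 1), ← List.filter_append]
        have happ := List.range'_append (s := 10) (m := 10 ^ (k + 1) - 10)
          (n := 9 * 10 ^ (k + 1)) (step := 1)
        rw [show 10 + 1 * (10 ^ (k + 1) - 10) = 10 ^ (k + 1) by omega] at happ
        rw [happ, show (10 ^ (k + 1) - 10) + 9 * 10 ^ (k + 1) = 10 ^ (k + 2) - 10 by
          have h3 : (10:Nat) ^ (k + 2) = 10 * 10 ^ (k + 1) := by ring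
          omega]
      have hbpos := List.length_pos_of_ne_nil (pvBatch_nonempty k)
      refine ih ((nth - ((sols ++ pvBatch (k + 2)).length : Int)).toNat) ?_ (k + 1) _ rfl hnew
      simp only [List.length_append]
      omega
    · rw [if_neg hlt]
      exact ⟨k, hs, by rw [← hs]; omega⟩

-- ===== VERDICT (by name: the statement is the Claim_ definition above) =====
theorem find_perfect_naive_spec : Claim_equal_find_perfect_naive := by
  intro nth _ hpre
  unfold Pre_find_perfect_naive at hpre
  unfold Spec_find_perfect_naive
  obtain ⟨K, hB, hlen⟩ := pv_loopB_eq nth nth.toNat 0 [] (by simp) (by norm_num)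
  unfold find_perfect_naive find_perfect_naive_alt
  rw [hB]
  rw [pv_loopA_eq (10 ^ (K + 1) - 10) 0 10 nth (by exact_mod_cast hpre) (by omega)]
  rw [PySem.List.pyGetD_of_nonneg _ _ (by omega : 0 ≤ nth - 1)]
  have hidx : (nth - ((0 : Nat) : Int)).toNat - 1 = (nth - 1).toNat := by
    push_cast; omega
  rw [hidx]
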